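-- pv_equiv track=rewrite | github.com/fraser29/kopare | kopare/iterative_shrink_wrap.py | _build_pt_to_tris
-- ===== SOURCE A (Python) =====
-- def _build_pt_to_tris(
--     tris: list[list[int] | None],
--     n_pts: int,
-- ) -> dict[int, set[int]]:
--     """Return a mapping from point index → set of triangle indices containing it."""
--     mapping: dict[int, set[int]] = {i: set() for i in range(n_pts)}
--     for tri_idx, tri in enumerate(tris):
--         if tri is None:
--             continue
--         for v in tri:
--             mapping[v].add(tri_idx)
--     return mapping
-- ===== SOURCE B (Python) =====
-- def _build_pt_to_tris(
--     tris: list[list[int] | None],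
--     n_pts: int,
-- ) -> dict[int, set[int]]:
--     """Return a mapping from point index -> set of triangle indices containing it."""
--     occ = [(v, ti) for ti, tri in enumerate(tris) if tri is not None for v in tri]
--     return {i: {ti for v, ti in occ if v == i} for i in range(n_pts)}
-- ===== Notes on version B (the rewrite author's own statement) =====
-- stated objective: alternative
-- what changed: A pre-seeds a dict of empty sets and inverts triangle->vertex by mutating set entries in place; B first flattens the triangles into a (vertex, triangle-index) occurrence list in one comprehension and then, per point, selects its triangle indices from that list by a set comprehension (two staged declarative passes over an intermediate occurrence list instead of A's single mutating inverse pass).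
import Mathlib
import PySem

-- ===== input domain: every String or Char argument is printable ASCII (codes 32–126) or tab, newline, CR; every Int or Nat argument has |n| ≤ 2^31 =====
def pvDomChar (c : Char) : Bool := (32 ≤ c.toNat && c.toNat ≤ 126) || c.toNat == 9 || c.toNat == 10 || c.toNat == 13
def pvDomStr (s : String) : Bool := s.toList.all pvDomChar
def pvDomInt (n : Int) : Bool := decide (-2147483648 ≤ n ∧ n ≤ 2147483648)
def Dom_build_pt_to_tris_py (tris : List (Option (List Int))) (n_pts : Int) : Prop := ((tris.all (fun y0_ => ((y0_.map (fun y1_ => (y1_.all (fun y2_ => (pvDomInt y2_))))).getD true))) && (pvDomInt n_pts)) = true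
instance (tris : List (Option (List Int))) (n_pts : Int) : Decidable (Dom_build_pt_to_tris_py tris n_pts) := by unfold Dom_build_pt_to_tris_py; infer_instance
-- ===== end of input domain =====

-- B replaces A's mutate-a-preseeded-dict inverse pass by two staged passes: flatten the
-- triangles into a (vertex, triangle-index) occurrence list, then select per point.
-- Alternative decomposition, not faster.

-- ===== PORT A =====
-- mapping[v].add(tri_idx) is ported as Dict.modify v Set.empty (·.add tri_idx); under
-- Pre_ every v is a pre-seeded key, so the default is never used (Python raises KeyError
-- exactly on the inputs Pre_ excludes).
def build_pt_to_tris_py (tris : List (Option (List Int))) (n_pts : Int) : List (Int × List Int) :=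
  let mapping : PySem.Dict Int (PySem.Set Int) :=
    (PySem.List.pyRange 0 n_pts 1).foldl (fun d i => d.insert i PySem.Set.empty) PySem.Dict.empty
  let mapping :=
    (PySem.List.enumerate tris).foldl
      (fun d p =>
        match p.2 with
        | none => d
        | some tri =>
            tri.foldl (fun d v => d.modify v PySem.Set.empty (fun s => PySem.Set.add s p.1)) d)
      mapping
  mapping.items

-- ===== PORT B =====
def build_pt_to_tris_py_alt (tris : List (Option (List Int))) (n_pts : Int) : List (Int × List Int) :=
  let occ : List (Int × Int) :=
    (PySem.List.enumerate tris).flatMap (fun p =>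
      match p.2 with
      | none => []
      | some tri => tri.map (fun v => (v, p.1)))
  (PySem.List.pyRange 0 n_pts 1).map (fun i =>
    (i, PySem.Set.ofList ((occ.filter (fun q => q.1 == i)).map (fun q => q.2))))

-- ===== PRECONDITION & SPEC =====
-- Pre_ excludes exactly the inputs where A raises KeyError: some triangle listing a
-- vertex outside range(n_pts).
def Pre_build_pt_to_tris_py (tris : List (Option (List Int))) (n_pts : Int) : Prop :=
  (tris.all (fun o => (o.getD []).all (fun v => decide (0 ≤ v ∧ v < n_pts)))) = true
instance (tris : List (Option (List Int))) (n_pts : Int) : Decidable (Pre_build_pt_to_tris_py tris n_pts) := by unfold Pre_build_pt_to_tris_py; infer_instance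

def pvWitness_build_pt_to_tris_py : List (Option (List Int)) × Int := ([some [0, 1, 2], none, some [1, 2]], 3)

def Spec_build_pt_to_tris_py (tris : List (Option (List Int))) (n_pts : Int) (out : List (Int × List Int)) : Prop := out = build_pt_to_tris_py_alt tris n_pts
instance (tris : List (Option (List Int))) (n_pts : Int) (out : List (Int × List Int)) : Decidable (Spec_build_pt_to_tris_py tris n_pts out) := by unfold Spec_build_pt_to_tris_py; infer_instance

-- ===== CLAIM (what is proved, stated in full; the proofs are below) =====
def Claim_equal_build_pt_to_tris_py : Prop := ∀ (tris : List (Option (List Int))) (n_pts : Int), Dom_build_pt_to_tris_py tris n_pts → Pre_build_pt_to_tris_py tris n_pts → Spec_build_pt_to_tris_py tris n_pts (build_pt_to_tris_py tris n_pts)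

-- ===== LEMMAS AND PROOFS =====

-- The value at key i after the inner per-triangle fold: add tri index t iff i is a vertex.
lemma getD_tri_fold (tri : List Int) (t : Int) (d : PySem.Dict Int (PySem.Set Int)) (i : Int) :
    (tri.foldl (fun d v => d.modify v PySem.Set.empty (fun s => PySem.Set.add s t)) d).getD i PySem.Set.empty
      = if i ∈ tri then PySem.Set.add (d.getD i PySem.Set.empty) t else d.getD i PySem.Set.empty := by
  induction tri generalizing d with
  | nil => simp
  | cons v rest ih =>
      by_cases hv : i = v
      · subst hv
        simp only [List.foldl_cons, ih, PySem.Dict.getD_modify_self, List.mem_cons, true_or, if_true]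
        split_ifs with h
        · exact PySem.Set.add_of_mem (by simp [PySem.Set.mem_add])
        · rfl
      · simp only [List.foldl_cons, ih, List.mem_cons,
          PySem.Dict.getD_modify_of_ne _ _ _ hv]
        have hiff : (i = v ∨ i ∈ rest) ↔ i ∈ rest := by tauto
        simp [hiff]

-- Keys are unchanged by the per-triangle fold when every vertex is already a key.
lemma keys_tri_fold (tri : List Int) (t : Int) (d : PySem.Dict Int (PySem.Set Int))
    (h : ∀ v ∈ tri, v ∈ d.keys) :
    (tri.foldl (fun d v => d.modify v PySem.Set.empty (fun s => PySem.Set.add s t)) d).keys = d.keys := by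
  induction tri generalizing d with
  | nil => rfl
  | cons v rest ih =>
      have hv : v ∈ d.keys := h v (by simp)
      have hk : (d.modify v PySem.Set.empty (fun s => PySem.Set.add s t)).keys = d.keys := by
        rw [PySem.Dict.keys_modify]
        exact PySem.Dict.keys_insert_of_contains d _ ((PySem.Dict.contains_iff_mem_keys d v).mpr hv)
      rw [List.foldl_cons, ih _ (by intro w hw; rw [hk]; exact h w (by simp [hw])), hk]

-- The outer fold over the enumerated triangles, pointwise at key i.
lemma getD_outer_fold (ts : List (Option (List Int))) (k : Int)
    (d : PySem.Dict Int (PySem.Set Int)) (i : Int) :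
    ((PySem.List.enumerate ts k).foldl
        (fun d p => match p.2 with
          | none => d
          | some tri =>
              tri.foldl (fun d v => d.modify v PySem.Set.empty (fun s => PySem.Set.add s p.1)) d)
        d).getD i PySem.Set.empty
      = (PySem.List.enumerate ts k).foldl
          (fun s p => match p.2 with
            | none => s
            | some tri => if i ∈ tri then PySem.Set.add s p.1 else s)
          (d.getD i PySem.Set.empty) := by
  induction ts generalizing k d with
  | nil => simp [PySem.List.enumerate_nil]
  | cons o rest ih =>
      rw [PySem.List.enumerate_cons]
      cases o with
      | none => simpa using ih (k + 1) d
      | some tri =>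
          simp only [List.foldl_cons]
          rw [ih (k + 1) (tri.foldl (fun d v => d.modify v PySem.Set.empty (fun s => PySem.Set.add s k)) d),
            getD_tri_fold]

-- Keys are unchanged by the outer fold when every vertex of every triangle is a key.
lemma keys_outer_fold (ts : List (Option (List Int))) (k : Int)
    (d : PySem.Dict Int (PySem.Set Int))
    (h : ∀ o ∈ ts, ∀ tri, o = some tri → ∀ v ∈ tri, v ∈ d.keys) :
    ((PySem.List.enumerate ts k).foldl
        (fun d p => match p.2 with
          | none => d
          | some tri =>
              tri.foldl (fun d v => d.modify v PySem.Set.empty (fun s => PySem.Set.add s p.1)) d)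
        d).keys = d.keys := by
  induction ts generalizing k d with
  | nil => rfl
  | cons o rest ih =>
      rw [PySem.List.enumerate_cons]
      cases o with
      | none =>
          simpa using ih (k + 1) d (fun o ho tri htri => h o (by simp [ho]) tri htri)
      | some tri =>
          have hk := keys_tri_fold tri k d (h _ (by simp) tri rfl)
          simp only [List.foldl_cons]
          rw [ih (k + 1) _ (by intro o ho tri' htri' v hv; rw [hk]; exact h o (by simp [ho]) tri' htri' v hv), hk]

-- Folding Set.add over one triangle's occurrence segment adds the index once iff i is a vertex.
lemma add_fold_segment (i t : Int) (tri : List Int) (s : PySem.Set Int) :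
    (((tri.map (fun v => (v, t))).filter (fun q => q.1 == i)).map (fun q => q.2)).foldl PySem.Set.add s
      = if i ∈ tri then PySem.Set.add s t else s := by
  induction tri generalizing s with
  | nil => simp
  | cons v rest ih =>
      by_cases hv : v = i
      · subst hv
        simp [ih]
      · have hne : ¬ (v == i) = true := by simp [hv]
        have hiff : (i = v ∨ i ∈ rest) ↔ i ∈ rest :=
          or_iff_right (fun h => hv h.symm)
        simp [hne, ih, hiff]

-- The per-point accumulation equals folding Set.add over i's entries of the occurrence list.
lemma perpoint_eq_occ (i : Int) (pairs : List (Int × Option (List Int))) (s : PySem.Set Int) :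
    pairs.foldl
        (fun s p => match p.2 with
          | none => s
          | some tri => if i ∈ tri then PySem.Set.add s p.1 else s) s
      = (((pairs.flatMap (fun p => match p.2 with
            | none => []
            | some tri => tri.map (fun v => (v, p.1)))).filter (fun q => q.1 == i)).map
            (fun q => q.2)).foldl PySem.Set.add s := by
  induction pairs generalizing s with
  | nil => rfl
  | cons p rest ih =>
      rcases p with ⟨t, o⟩
      cases o with
      | none => simpa using ih s
      | some tri =>
          simp only [List.flatMap_cons, List.filter_append, List.map_append, List.foldl_append,
            List.foldl_cons, add_fold_segment]
          exact ih _

-- The pre-seeded dict {i: set() for i in range(n_pts)} has items [(i, []) | i ∈ range].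
lemma items_init (n : Int) :
    ((PySem.List.pyRange 0 n 1).foldl (fun d i => d.insert i PySem.Set.empty)
        (PySem.Dict.empty : PySem.Dict Int (PySem.Set Int))).items
      = (PySem.List.pyRange 0 n 1).map (fun i => (i, PySem.Set.empty)) := by
  have := PySem.Dict.items_foldl_insert_fresh (l := PySem.List.pyRange 0 n 1)
      (k := fun i => i) (v := fun _ => (PySem.Set.empty : PySem.Set Int))
      (d := PySem.Dict.empty)
      (by intro a _; simp [PySem.Dict.contains_empty])
      (by simpa using PySem.List.nodup_pyRange_one 0 n)
  simpa using this

-- ===== VERDICT (by name: the statement is the Claim_ definition above) =====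
theorem build_pt_to_tris_py_spec : Claim_equal_build_pt_to_tris_py := by
  intro tris n_pts _hdom hpre
  unfold Spec_build_pt_to_tris_py build_pt_to_tris_py build_pt_to_tris_py_alt
  dsimp only
  have hnodupR : (PySem.List.pyRange 0 n_pts 1).Nodup := PySem.List.nodup_pyRange_one 0 n_pts
  have hpre' : ∀ o ∈ tris, ∀ tri, o = some tri → ∀ v ∈ tri, 0 ≤ v ∧ v < n_pts := by
    intro o ho tri htri v hv
    unfold Pre_build_pt_to_tris_py at hpre
    rw [List.all_eq_true] at hpre
    have h1 := hpre o ho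
    rw [List.all_eq_true] at h1
    exact of_decide_eq_true (h1 v (by rw [htri]; simpa using hv))
  set d0 := (PySem.List.pyRange 0 n_pts 1).foldl (fun d i => d.insert i PySem.Set.empty)
      (PySem.Dict.empty : PySem.Dict Int (PySem.Set Int)) with hd0
  have hitems0 : d0.items = (PySem.List.pyRange 0 n_pts 1).map (fun i => (i, PySem.Set.empty)) :=
    items_init n_pts
  have hkeys0 : d0.keys = PySem.List.pyRange 0 n_pts 1 := by
    show d0.items.map (·.1) = _
    rw [hitems0, List.map_map]; simp [Function.comp_def]
  have hmemkeys : ∀ o ∈ tris, ∀ tri, o = some tri → ∀ v ∈ tri, v ∈ d0.keys := by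
    intro o ho tri htri v hv
    rw [hkeys0, PySem.List.mem_pyRange_one]
    exact hpre' o ho tri htri v hv
  set D := (PySem.List.enumerate tris).foldl
      (fun d p => match p.2 with
        | none => d
        | some tri =>
            tri.foldl (fun d v => d.modify v PySem.Set.empty (fun s => PySem.Set.add s p.1)) d)
      d0 with hD
  have hkeysD : D.keys = PySem.List.pyRange 0 n_pts 1 := by
    rw [hD, keys_outer_fold tris 0 d0 hmemkeys, hkeys0]
  have hitemsD : D.items
      = (PySem.List.pyRange 0 n_pts 1).map (fun k => (k, D.getD k PySem.Set.empty)) := by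
    rw [PySem.Dict.items_eq_map_keys D (by rw [hkeysD]; exact hnodupR) PySem.Set.empty, hkeysD]
  rw [hitemsD]
  apply List.map_congr_left
  intro i hi
  have hgd0 : d0.getD i PySem.Set.empty = PySem.Set.empty := by
    apply PySem.Dict.getD_of_mem_items d0 (k := i) (v := PySem.Set.empty)
    · rw [hitems0]; exact List.mem_map.mpr ⟨i, hi, rfl⟩
    · rw [hkeys0]; exact hnodupR
  refine congrArg (fun s => (i, s)) ?_
  rw [hD, getD_outer_fold, hgd0, perpoint_eq_occ]
  exact (PySem.Set.ofList_eq_foldl _).symm
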